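-- pv_equiv track=rewrite | github.com/dariamaggi/tesi | grafo.py | M0
-- ===== SOURCE A (Python) =====
-- def M0(A, A_star, n):
--     onesA = 0
--     corrisp = 0
--     err = 0
--     for i in range(n):
--         for j in range(n):
--             if A[i][j] is 1:
--                 onesA += 1
--                 if A_star[i][j] is 1:
--                     corrisp += 1  # ho azzeccato
--             else:
--                 if A_star[i][j] is 1:  # colleg inaspettato
--                     err += 1
--     return [onesA, corrisp, err]
-- ===== SOURCE B (Python) =====
-- def M0(A, A_star, n):
--     cells = [(A[i][j], A_star[i][j]) for i in range(n) for j in range(n)]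
--     onesA = sum(1 for a, _ in cells if a is 1)
--     corrisp = sum(1 for a, s in cells if a is 1 and s is 1)
--     astarOnes = sum(1 for _, s in cells if s is 1)
--     return [onesA, corrisp, astarOnes - corrisp]
-- ===== Notes on version B (the rewrite author's own statement) =====
-- stated objective: alternative
-- what changed: Replaces the three-way branch counter with one pass that collects the (A,A_star) cell pairs and three filtered counts, deriving the unexpected-link count arithmetically as astarOnes - corrisp instead of counting it in its own else branch.
import Mathlib
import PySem

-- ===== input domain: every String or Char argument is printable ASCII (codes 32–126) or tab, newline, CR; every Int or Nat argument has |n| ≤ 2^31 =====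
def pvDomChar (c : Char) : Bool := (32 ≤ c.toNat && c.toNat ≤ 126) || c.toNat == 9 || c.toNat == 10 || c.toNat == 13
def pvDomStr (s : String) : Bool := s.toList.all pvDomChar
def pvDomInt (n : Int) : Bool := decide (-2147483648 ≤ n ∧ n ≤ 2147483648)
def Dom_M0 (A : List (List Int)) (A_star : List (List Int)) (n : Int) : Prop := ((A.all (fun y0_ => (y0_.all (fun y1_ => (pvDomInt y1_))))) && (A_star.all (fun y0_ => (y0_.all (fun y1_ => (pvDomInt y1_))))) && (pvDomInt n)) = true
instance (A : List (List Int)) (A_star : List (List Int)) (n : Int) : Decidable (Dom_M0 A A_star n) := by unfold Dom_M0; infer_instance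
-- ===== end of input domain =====

-- B replaces A's three-way branch counter by a flat cell-pair list with three filtered
-- counts, deriving the unexpected-link count as astarOnes - corrisp (objective: alternative).


-- cell lookup M[i][j]; Pre_ guarantees both indices are in range, so the defaults are never used
def pvCell (M : List (List Int)) (i j : Int) : Int :=
  (PySem.List.pyGet? ((PySem.List.pyGet? M i).getD []) j).getD 0

-- ===== PORT A =====
def M0 (A : List (List Int)) (A_star : List (List Int)) (n : Int) : List Int :=
  let r := PySem.List.pyRange 0 n 1
  let res : Int × Int × Int :=
    r.foldl (fun acc i =>
      r.foldl (fun acc j =>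
        if pvCell A i j = 1 then
          (acc.1 + 1, (if pvCell A_star i j = 1 then acc.2.1 + 1 else acc.2.1), acc.2.2)
        else
          (acc.1, acc.2.1, if pvCell A_star i j = 1 then acc.2.2 + 1 else acc.2.2))
        acc) (0, 0, 0)
  [res.1, res.2.1, res.2.2]

-- ===== PORT B =====
def M0_alt (A : List (List Int)) (A_star : List (List Int)) (n : Int) : List Int :=
  let r := PySem.List.pyRange 0 n 1
  let cells : List (Int × Int) :=
    r.flatMap (fun i => r.map (fun j => (pvCell A i j, pvCell A_star i j)))
  let onesA : Int := cells.countP (fun c => c.1 == 1)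
  let corrisp : Int := cells.countP (fun c => c.1 == 1 && c.2 == 1)
  let astarOnes : Int := cells.countP (fun c => c.2 == 1)
  [onesA, corrisp, astarOnes - corrisp]

-- ===== PRECONDITION & SPEC =====
-- Pre_ excludes exactly the inputs where A raises IndexError: for 0 ≤ n, the first n rows
-- of both matrices must exist and have at least n entries (for n < 0 the loops are empty).
def Pre_M0 (A : List (List Int)) (A_star : List (List Int)) (n : Int) : Prop :=
  0 ≤ n →
    (n ≤ (A.length : Int) ∧ n ≤ (A_star.length : Int) ∧
     (∀ row ∈ A.take n.toNat, n ≤ (row.length : Int)) ∧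
     (∀ row ∈ A_star.take n.toNat, n ≤ (row.length : Int)))
instance (A : List (List Int)) (A_star : List (List Int)) (n : Int) : Decidable (Pre_M0 A A_star n) := by unfold Pre_M0; infer_instance
def pvWitness_M0 : List (List Int) × List (List Int) × Int := ([[1, 0], [0, 1]], [[1, 1], [0, 0]], 2)

def Spec_M0 (A : List (List Int)) (A_star : List (List Int)) (n : Int) (out : List Int) : Prop := out = M0_alt A A_star n
instance (A : List (List Int)) (A_star : List (List Int)) (n : Int) (out : List Int) : Decidable (Spec_M0 A A_star n out) := by unfold Spec_M0; infer_instance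

-- ===== CLAIM (what is proved, stated in full; the proofs are below) =====
def Claim_equal_M0 : Prop := ∀ (A : List (List Int)) (A_star : List (List Int)) (n : Int), Dom_M0 A A_star n → Pre_M0 A A_star n → Spec_M0 A A_star n (M0 A A_star n)

-- ===== LEMMAS AND PROOFS =====

-- nested foldl equals foldl over the flattened cell list
theorem pv_foldl_flatMap {α β γ : Type} (xs : List α) (g : α → List β) (f : γ → β → γ) (init : γ) :
    (xs.flatMap g).foldl f init = xs.foldl (fun a x => (g x).foldl f a) init := by
  induction xs generalizing init with
  | nil => rfl
  | cons x xs ih => simp [List.flatMap_cons, List.foldl_append, ih]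

-- A's accumulator over a flat list of cell pairs, characterised by three counts
theorem pv_step_counts (L : List (Int × Int)) (o c e : Int) :
    L.foldl (fun acc (p : Int × Int) =>
        if p.1 = 1 then
          (acc.1 + 1, (if p.2 = 1 then acc.2.1 + 1 else acc.2.1), acc.2.2)
        else
          (acc.1, acc.2.1, if p.2 = 1 then acc.2.2 + 1 else acc.2.2)) (o, c, e)
      = (o + L.countP (fun p => p.1 == 1),
         c + L.countP (fun p => p.1 == 1 && p.2 == 1),
         e + L.countP (fun p => !(p.1 == 1) && p.2 == 1)) := by
  induction L generalizing o c e with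
  | nil => simp
  | cons p L ih =>
    by_cases h1 : p.1 = 1 <;> by_cases h2 : p.2 = 1 <;>
      simp [h1, h2, ih] <;> omega

-- partition of the A_star ones: ones = matches + unexpected links
theorem pv_count_split (L : List (Int × Int)) :
    L.countP (fun p => p.2 == 1)
      = L.countP (fun p => p.1 == 1 && p.2 == 1)
        + L.countP (fun p => !(p.1 == 1) && p.2 == 1) := by
  induction L with
  | nil => rfl
  | cons p L ih =>
    by_cases h1 : p.1 = 1 <;> by_cases h2 : p.2 = 1 <;>
      simp [h1, h2, ih] <;> omega

-- ===== VERDICT (by name: the statement is the Claim_ definition above) =====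
theorem M0_spec : Claim_equal_M0 := by
  intro A A_star n _ _
  unfold Spec_M0 M0 M0_alt
  simp only []
  set r := PySem.List.pyRange 0 n 1 with hr
  have hflat :
      (r.flatMap (fun i => r.map (fun j => (pvCell A i j, pvCell A_star i j)))).foldl
        (fun acc (p : Int × Int) =>
          if p.1 = 1 then
            (acc.1 + 1, (if p.2 = 1 then acc.2.1 + 1 else acc.2.1), acc.2.2)
          else
            (acc.1, acc.2.1, if p.2 = 1 then acc.2.2 + 1 else acc.2.2)) ((0 : Int), (0 : Int), (0 : Int))
      = r.foldl (fun acc i =>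
          r.foldl (fun acc j =>
            if pvCell A i j = 1 then
              (acc.1 + 1, (if pvCell A_star i j = 1 then acc.2.1 + 1 else acc.2.1), acc.2.2)
            else
              (acc.1, acc.2.1, if pvCell A_star i j = 1 then acc.2.2 + 1 else acc.2.2))
            acc) ((0 : Int), (0 : Int), (0 : Int)) := by
    rw [pv_foldl_flatMap]
    congr 1
    funext a i
    rw [List.foldl_map]
  rw [← hflat, pv_step_counts]
  set L := r.flatMap (fun i => r.map (fun j => (pvCell A i j, pvCell A_star i j))) with hL
  have hsplit := pv_count_split L
  rw [hsplit]
  push_cast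
  ring_nf
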